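-- pv_equiv track=rewrite | github.com/gosueep/coding-comps | Kickstart/RoundH/MagicalWellOfLilies.py | magic_well
-- ===== SOURCE A (Python) =====
-- def magic_well(lilies):
--     best = float('inf')
--     for i in range(1, lilies+1):
--         rem = lilies - i
--         altCost = i + 4 + 2 * (rem // i) + (rem % i)
--         if lilies > altCost:
--             if altCost < best:
--                 best = altCost
--
--     if best < lilies:
--         return best
--     return lilies
-- ===== SOURCE B (Python) =====
-- def magic_well(lilies):
--     # divisor-block decomposition: within each block of constant q = lilies//i
--     # the cost i + 4 + 2*((lilies-i)//i) + ((lilies-i)%i) = lilies + 2 + 2*q - i*(q-1)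
--     # is non-increasing in i, so only the block's last index can be optimal.
--     best = None
--     i = 1
--     while i <= lilies:
--         q = lilies // i
--         j = lilies // q          # last index with the same quotient q
--         cost = j + 2 + 2 * q + (lilies - j * q)
--         if cost < lilies and (best is None or cost < best):
--             best = cost
--         i = j + 1
--     return best if best is not None else lilies
-- ===== Notes on version B (the rewrite author's own statement) =====
-- stated objective: faster
-- what changed: Replaced the linear scan over all i in 1..lilies by a divisor-block (quotient) decomposition: the cost is non-increasing within each block of constant lilies//i, so only O(sqrt(lilies)) block endpoints are evaluated.
import Mathlib
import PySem

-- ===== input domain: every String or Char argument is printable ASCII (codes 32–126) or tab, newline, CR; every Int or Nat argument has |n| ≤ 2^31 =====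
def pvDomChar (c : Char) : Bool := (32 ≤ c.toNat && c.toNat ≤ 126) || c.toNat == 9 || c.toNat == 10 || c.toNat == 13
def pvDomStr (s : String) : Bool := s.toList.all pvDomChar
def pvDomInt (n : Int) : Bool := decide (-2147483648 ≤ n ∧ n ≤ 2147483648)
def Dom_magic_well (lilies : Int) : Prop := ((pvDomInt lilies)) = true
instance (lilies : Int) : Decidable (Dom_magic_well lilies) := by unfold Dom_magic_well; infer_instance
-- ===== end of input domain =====

-- B replaces A's linear scan over i = 1..lilies by a divisor-block (quotient) decomposition,
-- evaluating the cost only at the last index of each constant-quotient block (objective: faster).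


-- ===== PORT A =====
-- loop body of A: rem = lilies - i; altCost = i + 4 + 2*(rem//i) + rem % i;
-- if lilies > altCost and altCost < best: best = altCost.  (best = none plays float('inf'))
def stepA (lilies : Int) (best : Option Int) (i : Int) : Option Int :=
  let rem := lilies - i
  let altCost := i + 4 + 2 * PySem.Int.floordiv rem i + PySem.Int.mod rem i
  if lilies > altCost then
    match best with
    | none => some altCost          -- altCost < inf
    | some b => if altCost < b then some altCost else best
  else best

def magic_well (lilies : Int) : Int :=
  let best := (PySem.List.pyRange 1 (lilies + 1) 1).foldl (stepA lilies) none
  match best with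
  | some b => if b < lilies then b else lilies
  | none => lilies                  -- best = inf: inf < lilies is false

-- ===== PORT B =====
-- B's while loop; fuel only makes the recursion total (each pass moves i past a whole
-- quotient block, so lilies.toNat + 1 passes always suffice — proved below).
def loopB (lilies : Int) : Nat → Int → Option Int → Option Int
  | 0, _, best => best
  | fuel + 1, i, best =>
    if i ≤ lilies then
      let q := PySem.Int.floordiv lilies i
      let j := PySem.Int.floordiv lilies q
      let cost := j + 2 + 2 * q + (lilies - j * q)
      let best' :=
        if cost < lilies then
          match best with
          | none => some cost       -- best is None
          | some b => if cost < b then some cost else best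
        else best
      loopB lilies fuel (j + 1) best'
    else best

def magic_well_alt (lilies : Int) : Int :=
  match loopB lilies (lilies.toNat + 1) 1 none with
  | some b => b
  | none => lilies

-- ===== PRECONDITION & SPEC =====
def Spec_magic_well (lilies : Int) (out : Int) : Prop := out = magic_well_alt lilies
instance (lilies : Int) (out : Int) : Decidable (Spec_magic_well lilies out) := by unfold Spec_magic_well; infer_instance

-- ===== CLAIM (what is proved, stated in full; the proofs are below) =====
def Claim_equal_magic_well : Prop := ∀ (lilies : Int), Dom_magic_well lilies → Spec_magic_well lilies (magic_well lilies)

-- ===== LEMMAS AND PROOFS =====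

-- the merge that both loop bodies perform, abstracted over the cost value
def pvMerge (L : Int) (best : Option Int) (c : Int) : Option Int :=
  if c < L then
    match best with
    | none => some c
    | some b => if c < b then some c else best
  else best

lemma stepA_eq_merge (L best i) : stepA L best i =
    pvMerge L best (i + 4 + 2 * PySem.Int.floordiv (L - i) i + PySem.Int.mod (L - i) i) := rfl

-- A's cost at k, written through the quotient q = L / k
lemma stepA_char (L k q : Int) (hk : 1 ≤ k) (hq : L / k = q) (best : Option Int) :
    stepA L best k = pvMerge L best (L + 2 + 2 * q + k * (1 - q)) := by
  rw [stepA_eq_merge]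
  have hk0 : (0:Int) < k := by omega
  rw [PySem.Int.floordiv_eq_ediv_of_pos hk0, PySem.Int.mod_eq_emod_of_pos hk0]
  have hdiv : (L - k) / k = q - 1 := by
    have : L - k = L + (-1) * k := by ring
    rw [this, Int.add_mul_ediv_right _ _ (by omega : k ≠ 0), hq]; ring
  have hmod : (L - k) % k = L - k * q := by
    have h1 : (L - k) % k = L % k := Int.sub_emod_right L k
    rw [h1, Int.emod_def, hq]
  rw [hdiv, hmod]; ring_nf

lemma merge_lt (L c : Int) (best : Option Int) (h : ∀ b, best = some b → b < L) :
    ∀ b', pvMerge L best c = some b' → b' < L := by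
  intro b' hb'
  unfold pvMerge at hb'
  rcases best with _ | b0
  · by_cases h1 : c < L <;> simp [h1] at hb' <;> omega
  · have hb0 : b0 < L := h b0 rfl
    by_cases h1 : c < L <;> by_cases h2 : c < b0 <;> simp [h1, h2] at hb' <;> omega

lemma merge_absorb (L c1 c2 : Int) (best : Option Int) (h : c2 ≤ c1) :
    pvMerge L (pvMerge L best c1) c2 = pvMerge L best c2 := by
  unfold pvMerge
  rcases best with _ | b <;> by_cases h1 : c1 < L <;> by_cases h2 : c2 < L <;>
    simp only [h1, h2, if_pos, if_neg, not_false_iff] <;>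
    (try split_ifs) <;> simp_all <;> omega

-- division block facts: q ≥ 1, i ≤ j ≤ L, and the quotient is q throughout [i, j]
lemma block_facts (L i : Int) (h1 : 1 ≤ i) (h2 : i ≤ L) :
    1 ≤ L / i ∧ i ≤ L / (L / i) ∧ L / (L / i) ≤ L ∧
      (∀ k, i ≤ k → k ≤ L / (L / i) → L / k = L / i) := by
  have hi0 : (0:Int) < i := by omega
  have hq1 : 1 ≤ L / i := by
    rw [Int.le_ediv_iff_mul_le hi0]; omega
  have hq0 : (0:Int) < L / i := by omega
  have hij : i ≤ L / (L / i) := by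
    rw [Int.le_ediv_iff_mul_le hq0]
    calc i * (L / i) = L / i * i := by ring
    _ ≤ L := Int.ediv_mul_le L (by omega)
  have hjL : L / (L / i) ≤ L := Int.ediv_le_self _ (by omega)
  refine ⟨hq1, hij, hjL, fun k hik hkj => ?_⟩
  have hk0 : (0:Int) < k := by omega
  have hjq : L / (L / i) * (L / i) ≤ L := Int.ediv_mul_le L (by omega)
  have hlow : L / i ≤ L / k := by
    rw [Int.le_ediv_iff_mul_le hk0]
    nlinarith
  have hhigh : L / k ≤ L / i := by
    by_contra hcon
    have h3 : L / i + 1 ≤ L / k := by omega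
    rw [Int.le_ediv_iff_mul_le hk0] at h3
    have h4 : (L / i + 1) * i ≤ (L / i + 1) * k := by nlinarith
    have h5 : L / i + 1 ≤ L / i := by
      rw [Int.le_ediv_iff_mul_le hi0]; omega
    omega
  omega

-- folding A's step over one whole quotient block equals one merge with the block-end cost
lemma fold_block (L q j : Int) (hq1 : 1 ≤ q) :
    ∀ (n : Nat) (k : Int) (best : Option Int), 1 ≤ k → j = k + n →
      (∀ m, k ≤ m → m ≤ j → L / m = q) →
      (PySem.List.pyRange k (j + 1) 1).foldl (stepA L) best =
        pvMerge L best (L + 2 + 2 * q + j * (1 - q)) := by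
  intro n
  induction n with
  | zero =>
    intro k best hk hj hall
    have hkj : j = k := by omega
    subst hkj
    rw [PySem.List.pyRange_one_singleton, List.foldl_cons, List.foldl_nil,
      stepA_char L j q (by omega) (hall j (by omega) (by omega)) best]
  | succ n ih =>
    intro k best hk hj hall
    have hkj : k < j := by omega
    rw [PySem.List.pyRange_one_cons (by omega : k < j + 1), List.foldl_cons]
    rw [ih (k + 1) (stepA L best k) (by omega) (by omega)
      (fun m hm1 hm2 => hall m (by omega) hm2)]
    rw [stepA_char L k q (by omega) (hall k (by omega) (by omega)) best]
    exact merge_absorb L _ _ best (by nlinarith)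

-- B's fueled block loop computes A's left fold over the remaining range
lemma loop_eq (L : Int) : ∀ (fuel : Nat) (i : Int) (best : Option Int),
    1 ≤ i → L + 1 - i ≤ (fuel : Int) →
    loopB L fuel i best = (PySem.List.pyRange i (L + 1) 1).foldl (stepA L) best := by
  intro fuel
  induction fuel with
  | zero =>
    intro i best h1 h2
    rw [PySem.List.pyRange_one_eq_nil (by omega : L + 1 ≤ i)]
    rfl
  | succ fuel ih =>
    intro i best h1 h2
    by_cases hiL : i ≤ L
    · have hi0 : (0:Int) < i := by omega
      obtain ⟨hq1, hij, hjL, hall⟩ := block_facts L i h1 hiL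
      have hq0 : (0:Int) < L / i := by omega
      show loopB L (fuel + 1) i best = _
      rw [loopB]
      simp only [if_pos hiL,
        PySem.Int.floordiv_eq_ediv_of_pos hi0]
      rw [PySem.Int.floordiv_eq_ediv_of_pos hq0]
      set q := L / i with hqdef
      set j := L / q with hjdef
      have hsplit : PySem.List.pyRange i (L + 1) 1 =
          PySem.List.pyRange i (j + 1) 1 ++ PySem.List.pyRange (j + 1) (L + 1) 1 :=
        PySem.List.pyRange_one_append i (j + 1) (L + 1) (by omega) (by omega)
      rw [hsplit, List.foldl_append]
      have hn : j = i + ((j - i).toNat : Int) := by omega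
      rw [fold_block L q j hq1 (j - i).toNat i best h1 hn hall]
      rw [ih (j + 1) _ (by omega) (by omega)]
      congr 1
      unfold pvMerge
      have hcost : j + 2 + 2 * q + (L - j * q) = L + 2 + 2 * q + j * (1 - q) := by ring
      rw [hcost]
    · rw [PySem.List.pyRange_one_eq_nil (by omega : L + 1 ≤ i)]
      rw [loopB]
      simp only [if_neg hiL]
      rfl

-- any `some` value A's fold produces is < L (only qualifying costs are stored)
lemma fold_lt (L : Int) : ∀ (xs : List Int) (best : Option Int),
    (∀ b, best = some b → b < L) → ∀ b, xs.foldl (stepA L) best = some b → b < L := by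
  intro xs
  induction xs with
  | nil => intro best h b hb; exact h b hb
  | cons x xs ih =>
    intro best h b hb
    refine ih (stepA L best x) ?_ b hb
    intro b' hb'
    rw [stepA_eq_merge] at hb'
    exact merge_lt L _ best h b' hb'

-- ===== VERDICT (by name: the statement is the Claim_ definition above) =====
theorem magic_well_spec : Claim_equal_magic_well := by
  intro L _
  unfold Spec_magic_well magic_well magic_well_alt
  rw [loop_eq L (L.toNat + 1) 1 none (by omega)
    (by have := Int.self_le_toNat L; push_cast; omega)]
  have hlt := fold_lt L (PySem.List.pyRange 1 (L + 1) 1) none (by intro b h; cases h)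
  cases hbest : (PySem.List.pyRange 1 (L + 1) 1).foldl (stepA L) none with
  | none => rfl
  | some b =>
    simp only
    rw [if_pos (hlt b hbest)]
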